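-- pv_equiv track=rewrite | github.com/tweenkal/Python_Changes | Office/Python 3.10 jan batch1/PQ5.py | max_new_people
-- ===== SOURCE A (Python) =====
-- def max_new_people(seat_row):
--     """
--     Calculate the maximum number of new people who can be seated
--     maintaining at least 2 empty seats gap.
--     """
--     total_seats = len(seat_row)
--     new_people_count = 0
--
--     for seat_index in range(total_seats):
--         if seat_row[seat_index] == 0:
--             # Check left 2 seats
--             left_clear = (seat_index == 0 or seat_row[seat_index - 1] == 0) and \
--                          (seat_index <= 1 or seat_row[seat_index - 2] == 0)
--
--             # Check right 2 seats
--             right_clear = (seat_index == total_seats - 1 or seat_row[seat_index + 1] == 0) and \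
--                           (seat_index >= total_seats - 2 or seat_row[seat_index + 2] == 0)
--
--             # If both sides clear, seat a new person
--             if left_clear and right_clear:
--                 seat_row[seat_index] = 1
--                 new_people_count += 1
--
--     return new_people_count
-- ===== SOURCE B (Python) =====
-- def max_new_people(seat_row):
--     """Runs-of-zeros with a closed-form count per run (no per-seat window checks).
--     Note: unlike A, B does not mutate seat_row; the return value is identical."""
--     n = len(seat_row)
--     count = 0
--     run = 0
--     for i in range(n):
--         if seat_row[i] == 0:
--             run += 1
--         else:
--             if run > 0:
--                 count += _run_count(run, run == i, False)
--             run = 0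
--     if run > 0:
--         count += _run_count(run, run == n, True)
--     return count
--
-- def _run_count(length, left_edge, right_edge):
--     usable = length - (0 if left_edge else 2) - (0 if right_edge else 2)
--     return (usable + 2) // 3 if usable > 0 else 0
-- ===== Notes on version B (the rewrite author's own statement) =====
-- stated objective: alternative
-- what changed: A scans every index and tests a 5-seat window on the row it mutates in place; B makes one pass that extracts maximal runs of empty seats and adds a closed-form count ((usable+2)//3) per run, never touching the row.
import Mathlib
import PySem

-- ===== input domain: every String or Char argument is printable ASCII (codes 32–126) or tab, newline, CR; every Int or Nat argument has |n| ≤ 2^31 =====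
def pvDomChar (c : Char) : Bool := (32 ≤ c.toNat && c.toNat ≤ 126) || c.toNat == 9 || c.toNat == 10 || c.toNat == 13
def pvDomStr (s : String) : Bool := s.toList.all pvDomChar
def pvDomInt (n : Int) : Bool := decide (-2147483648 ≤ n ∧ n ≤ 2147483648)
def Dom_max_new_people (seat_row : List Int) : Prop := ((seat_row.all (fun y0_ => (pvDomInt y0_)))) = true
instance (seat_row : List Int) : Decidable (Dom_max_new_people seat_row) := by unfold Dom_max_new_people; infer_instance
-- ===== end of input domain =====

-- B replaces A's per-index window checks (on a row it mutates) by a single runs-of-zeros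
-- pass with a closed-form count per run; equivalence is about the RETURN value only
-- (A mutates seat_row in place, B does not).

-- ===== PORT A =====
-- A's for-loop over range(total_seats), carrying the (mutated) row and the count.
-- List reads use getD 0: every read whose index could be out of range sits to the right
-- of a disjunct that is then true, exactly where Python's `or` short-circuits.
def aLoop (n : Nat) (i : Nat) (row : List Int) (cnt : Int) : List Int × Int :=
  if i < n then
    if row.getD i 0 = 0 then
      if ((i = 0 ∨ row.getD (i - 1) 0 = 0) ∧ (i ≤ 1 ∨ row.getD (i - 2) 0 = 0)) ∧
         ((i = n - 1 ∨ row.getD (i + 1) 0 = 0) ∧ (n - 2 ≤ i ∨ row.getD (i + 2) 0 = 0)) then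
        aLoop n (i + 1) (row.set i 1) (cnt + 1)
      else aLoop n (i + 1) row cnt
    else aLoop n (i + 1) row cnt
  else (row, cnt)
termination_by n - i

def max_new_people (seat_row : List Int) : Int :=
  (aLoop seat_row.length 0 seat_row 0).2

-- ===== PORT B =====
-- _run_count from Source B
def rcCore (usable : Int) : Int :=
  if usable > 0 then PySem.Int.floordiv (usable + 2) 3 else 0

def runCount (length : Int) (le re : Bool) : Int :=
  rcCore (length - (if le then 0 else 2) - (if re then 0 else 2))

-- Source B's for-loop over the row carrying (count, run); the post-loop flush of the
-- final run is the base case (there i = n).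
def bLoop : List Int → Int → Int → Int → Int
  | [], i, count, run => if run > 0 then count + runCount run (run == i) true else count
  | v :: rest, i, count, run =>
    if v = 0 then bLoop rest (i + 1) count (run + 1)
    else bLoop rest (i + 1) (if run > 0 then count + runCount run (run == i) false else count) 0

def max_new_people_alt (seat_row : List Int) : Int :=
  bLoop seat_row 0 0 0

-- ===== PRECONDITION & SPEC =====
def Spec_max_new_people (seat_row : List Int) (out : Int) : Prop := out = max_new_people_alt seat_row
instance (seat_row : List Int) (out : Int) : Decidable (Spec_max_new_people seat_row out) := by unfold Spec_max_new_people; infer_instance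

-- ===== CLAIM (what is proved, stated in full; the proofs are below) =====
def Claim_equal_max_new_people : Prop := ∀ (seat_row : List Int), Dom_max_new_people seat_row → Spec_max_new_people seat_row (max_new_people seat_row)

-- ===== LEMMAS AND PROOFS =====

-- Common automaton: left-to-right over the ORIGINAL suffix, state (p2, p1) = the
-- (post-mutation) values two seats and one seat behind, edges encoded as 0.
def rightOk : List Int → Bool
  | [] => true
  | [a] => a == 0
  | a :: b :: _ => a == 0 && b == 0

def autoA : Int → Int → List Int → Int
  | _, _, [] => 0
  | p2, p1, v :: rest =>
    if v = 0 ∧ p2 = 0 ∧ p1 = 0 ∧ rightOk rest then 1 + autoA p1 1 rest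
    else autoA p1 v rest

-- value k seats behind the split point (0 if past the left edge)
def back (pre : List Int) (k : Nat) : Int := pre.reverse.getD k 0

lemma back_append (pre : List Int) (x : Int) :
    back (pre ++ [x]) 0 = x ∧ back (pre ++ [x]) 1 = back pre 0 := by
  simp [back]

lemma set_append_len (pre : List Int) (v x : Int) (rest : List Int) :
    (pre ++ v :: rest).set pre.length x = pre ++ x :: rest := by
  induction pre with
  | nil => simp
  | cons a t ih => simp [ih]

lemma getD_append_len (pre : List Int) (v : Int) (rest : List Int) :
    (pre ++ v :: rest).getD pre.length 0 = v := by
  simp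

lemma back_zero (pre : List Int) (h : 1 ≤ pre.length) :
    back pre 0 = pre.getD (pre.length - 1) 0 := by
  unfold back List.getD
  rw [List.getElem?_reverse (by omega)]
  simp

lemma back_one (pre : List Int) (h : 2 ≤ pre.length) :
    back pre 1 = pre.getD (pre.length - 2) 0 := by
  unfold back List.getD
  rw [List.getElem?_reverse (by omega)]
  have h2 : pre.length - 1 - 1 = pre.length - 2 := by omega
  rw [h2]

lemma back_oob (pre : List Int) (k : Nat) (h : pre.length ≤ k) :
    back pre k = 0 := by
  unfold back
  rw [List.getD_eq_default]
  simpa using h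

-- A's left-window test at index pre.length, in terms of `back`
lemma left_iff (pre : List Int) (v : Int) (rest : List Int) :
    ((pre.length = 0 ∨ (pre ++ v :: rest).getD (pre.length - 1) 0 = 0) ∧
      (pre.length ≤ 1 ∨ (pre ++ v :: rest).getD (pre.length - 2) 0 = 0)) ↔
    (back pre 1 = 0 ∧ back pre 0 = 0) := by
  rcases Nat.lt_or_ge pre.length 1 with h1 | h1
  · have hp : pre = [] := List.eq_nil_of_length_eq_zero (by omega)
    subst hp
    simp [back]
  · rcases Nat.lt_or_ge pre.length 2 with h2 | h2
    · rw [List.getD_append _ _ _ _ (by omega)]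
      rw [back_zero pre (by omega), back_oob pre 1 (by omega)]
      constructor
      · rintro ⟨ha, _⟩
        rcases ha with ha | ha
        · omega
        · exact ⟨rfl, ha⟩
      · rintro ⟨_, hb⟩
        exact ⟨Or.inr hb, Or.inl (by omega)⟩
    · rw [List.getD_append _ _ _ _ (by omega), List.getD_append _ _ _ _ (by omega)]
      rw [back_zero pre (by omega), back_one pre (by omega)]
      constructor
      · rintro ⟨ha, hb⟩
        rcases ha with ha | ha
        · omega
        · rcases hb with hb | hb
          · omega
          · exact ⟨hb, ha⟩
      · rintro ⟨ha, hb⟩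
        exact ⟨Or.inr hb, Or.inr ha⟩

-- A's right-window test at index pre.length, in terms of rightOk
lemma right_iff (pre : List Int) (v : Int) (rest : List Int) :
    ((pre.length = pre.length + (v :: rest).length - 1 ∨
        (pre ++ v :: rest).getD (pre.length + 1) 0 = 0) ∧
      (pre.length + (v :: rest).length - 2 ≤ pre.length ∨
        (pre ++ v :: rest).getD (pre.length + 2) 0 = 0)) ↔ rightOk rest = true := by
  have g1 : (pre ++ v :: rest).getD (pre.length + 1) 0 = rest.getD 0 0 := by
    rw [List.getD_append_right _ _ _ _ (by omega)]
    simp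
  have g2 : (pre ++ v :: rest).getD (pre.length + 2) 0 = rest.getD 1 0 := by
    rw [List.getD_append_right _ _ _ _ (by omega)]
    have : pre.length + 2 - pre.length = 2 := by omega
    rw [this]
    simp [List.getD]
  rw [g1, g2]
  cases rest with
  | nil => simp [rightOk]
  | cons a t =>
    cases t with
    | nil => simp [rightOk, List.getD]
    | cons b t' => simp [rightOk, List.getD]

-- A's loop equals the automaton
lemma aMain : ∀ (suffix pre : List Int) (cnt : Int),
    (aLoop (pre.length + suffix.length) pre.length (pre ++ suffix) cnt).2
      = cnt + autoA (back pre 1) (back pre 0) suffix := by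
  intro suffix
  induction suffix with
  | nil => intro pre cnt; rw [aLoop]; simp [autoA]
  | cons v rest ih =>
    intro pre cnt
    rw [aLoop]
    have hn : pre.length < pre.length + (v :: rest).length := by simp
    rw [if_pos hn, getD_append_len]
    by_cases hv : v = 0
    · rw [if_pos hv]
      by_cases hc : (back pre 1 = 0 ∧ back pre 0 = 0) ∧ rightOk rest = true
      · rw [if_pos (by rw [left_iff, right_iff]; exact hc)]
        rw [set_append_len]
        have he : pre ++ (1:Int) :: rest = (pre ++ [1]) ++ rest := by simp
        rw [he]
        have hl : pre.length + 1 = (pre ++ [(1:Int)]).length := by simp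
        have hn' : pre.length + (v :: rest).length = (pre ++ [(1:Int)]).length + rest.length := by
          simp; omega
        rw [hl, hn', ih]
        rw [autoA]
        rw [if_pos ⟨hv, hc.1.1, hc.1.2, hc.2⟩]
        rw [(back_append pre 1).1, (back_append pre 1).2, hc.1.2]
        ring
      · rw [if_neg (by rw [left_iff, right_iff]; exact hc)]
        have he : pre ++ v :: rest = (pre ++ [v]) ++ rest := by simp
        rw [he]
        have hl : pre.length + 1 = (pre ++ [v]).length := by simp
        have hn' : pre.length + (v :: rest).length = (pre ++ [v]).length + rest.length := by
          simp; omega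
        rw [hl, hn', ih]
        rw [autoA]
        rw [if_neg (by rw [hv]; intro h; exact hc ⟨⟨h.2.1, h.2.2.1⟩, h.2.2.2⟩)]
        rw [(back_append pre v).1, (back_append pre v).2, hv]
    · rw [if_neg hv]
      have he : pre ++ v :: rest = (pre ++ [v]) ++ rest := by simp
      rw [he]
      have hl : pre.length + 1 = (pre ++ [v]).length := by simp
      have hn' : pre.length + (v :: rest).length = (pre ++ [v]).length + rest.length := by
        simp; omega
      rw [hl, hn', ih]
      rw [autoA]
      rw [if_neg (by intro h; exact hv h.1)]
      rw [(back_append pre v).1, (back_append pre v).2]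

-- ===== B side =====

-- after a nonzero head, the automaton ignores p2
lemma nz_head (a b w : Int) (hw : w ≠ 0) (t : List Int) :
    autoA a w t = autoA b w t := by
  cases t with
  | nil => rfl
  | cons v t' =>
    rw [autoA, autoA]
    rw [if_neg (by rintro ⟨_, _, h, _⟩; exact hw h), if_neg (by rintro ⟨_, _, h, _⟩; exact hw h)]

def tailv : List Int → Int
  | [] => 0
  | w :: t => autoA 0 w t

lemma rightOk_rep (m : Nat) (rest : List Int) (hb : rest.headD 1 ≠ 0) :
    rightOk (List.replicate m 0 ++ rest) = true ↔ (2 ≤ m ∨ rest = []) := by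
  match m, rest with
  | 0, [] => simp [rightOk]
  | 0, w :: t =>
    replace hb : w ≠ 0 := by simpa using hb
    simp only [List.replicate, List.nil_append]
    cases t with
    | nil => simp [rightOk, hb]
    | cons b t' => simp [rightOk, hb]
  | 1, [] => simp [rightOk]
  | 1, w :: t =>
    replace hb : w ≠ 0 := by simpa using hb
    simp [List.replicate, rightOk, hb]
  | m + 2, rest =>
    have hrw : List.replicate (m + 2) (0:Int) ++ rest = 0 :: 0 :: (List.replicate m 0 ++ rest) := by
      simp [List.replicate_succ]
    rw [hrw, rightOk]
    simp

lemma rcCore_step (u : Int) (hu : 1 ≤ u) : rcCore u = 1 + rcCore (u - 3) := by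
  unfold rcCore
  split_ifs <;>
    (try simp only [PySem.Int.floordiv_eq_ediv_of_pos (show (0:Int) < 3 by norm_num)]) <;> omega

lemma rcCore_nonpos (u : Int) (hu : u ≤ 0) : rcCore u = 0 := by
  unfold rcCore
  rw [if_neg (by omega)]

lemma runCount_seat (m : Int) (e : Bool) (hm : 0 ≤ m) (h : 2 ≤ m ∨ e = true) :
    runCount (m + 1) true e = 1 + runCount m false e := by
  unfold runCount
  cases e with
  | true =>
    simp only [Bool.false_eq_true, reduceIte]
    rw [show (m + 1 - 0 - 0 : Int) = m + 1 from by ring,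
        show (m - 2 - 0 : Int) = (m + 1) - 3 from by ring]
    exact rcCore_step (m + 1) (by omega)
  | false =>
    have hm2 : 2 ≤ m := by
      rcases h with h | h
      · exact h
      · exact absurd h (by decide)
    simp only [Bool.false_eq_true, reduceIte]
    rw [show (m + 1 - 0 - 2 : Int) = m - 1 from by ring,
        show (m - 2 - 2 : Int) = (m - 1) - 3 from by ring]
    exact rcCore_step (m - 1) (by omega)

lemma runCount_shift (m : Int) (e : Bool) :
    runCount (m + 2) false e = runCount m true e := by
  unfold runCount
  congr 1
  simp

lemma runCount_small_true (m : Int) (hm : m ≤ 1) :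
    runCount (m + 1) true false = runCount m true false := by
  unfold runCount
  simp only [Bool.false_eq_true, reduceIte]
  rw [rcCore_nonpos (m + 1 - 0 - 2) (by omega), rcCore_nonpos (m - 0 - 2) (by omega)]

lemma runCount_zero (le re : Bool) : runCount 0 le re = 0 := by
  cases le <;> cases re <;> decide

-- the zero-run lemma: the automaton counts a whole run of zeros in closed form
lemma zrun : ∀ (L : Nat) (le : Bool) (p2 p1 : Int) (rest : List Int),
    rest.headD 1 ≠ 0 →
    (if le then p2 = 0 ∧ p1 = 0 else p1 ≠ 0) →
    autoA p2 p1 (List.replicate L 0 ++ rest) = runCount (L : Int) le rest.isEmpty + tailv rest := by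
  intro L
  induction L using Nat.strong_induction_on with
  | _ L ih =>
    intro le p2 p1 rest hb hentry
    cases le with
    | false =>
      simp at hentry
      match L with
      | 0 =>
        cases rest with
        | nil => simp [autoA, tailv, runCount_zero]
        | cons w t =>
          replace hb : w ≠ 0 := by simpa using hb
          simp only [List.replicate, List.nil_append]
          rw [autoA, if_neg (by rintro ⟨h, _⟩; exact hb h)]
          rw [nz_head p1 0 w hb t]
          simp [tailv]
          decide
      | 1 =>
        simp only [List.replicate, List.cons_append, List.nil_append]
        rw [autoA, if_neg (by rintro ⟨_, _, h, _⟩; exact hentry h)]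
        cases rest with
        | nil => simp [autoA, tailv]; decide
        | cons w t =>
          replace hb : w ≠ 0 := by simpa using hb
          rw [autoA, if_neg (by rintro ⟨h, _⟩; exact hb h)]
          rw [nz_head 0 0 w hb t]
          simp [tailv]
          decide
      | (m + 2) =>
        have hrw : List.replicate (m + 2) (0:Int) ++ rest
            = 0 :: 0 :: (List.replicate m 0 ++ rest) := by simp [List.replicate_succ]
        rw [hrw]
        rw [autoA, if_neg (by rintro ⟨_, _, h, _⟩; exact hentry h)]
        rw [autoA, if_neg (by rintro ⟨_, h, _, _⟩; exact hentry h)]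
        rw [ih m (by omega) true 0 0 rest hb (by simp)]
        have hc : ((m + 2 : Nat) : Int) = (m : Int) + 2 := by push_cast; ring
        rw [hc, runCount_shift]
    | true =>
      simp at hentry
      obtain ⟨h2, h1⟩ := hentry
      subst h2; subst h1
      match L with
      | 0 =>
        cases rest with
        | nil => simp [autoA, tailv, runCount_zero]
        | cons w t =>
          replace hb : w ≠ 0 := by simpa using hb
          simp only [List.replicate, List.nil_append]
          rw [autoA, if_neg (by rintro ⟨h, _⟩; exact hb h)]
          rw [nz_head 0 0 w hb t]
          simp [tailv]
          decide
      | (m + 1) =>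
        have hrw : List.replicate (m + 1) (0:Int) ++ rest
            = 0 :: (List.replicate m 0 ++ rest) := by simp [List.replicate_succ]
        rw [hrw]
        rw [autoA]
        by_cases hseat : 2 ≤ m ∨ rest = []
        · rw [if_pos ⟨rfl, rfl, rfl, (rightOk_rep m rest hb).2 hseat⟩]
          rw [ih m (by omega) false 0 1 rest hb (by simp)]
          have hc : ((m + 1 : Nat) : Int) = (m : Int) + 1 := by push_cast; ring
          have hor : 2 ≤ (m : Int) ∨ rest.isEmpty = true := by
            rcases hseat with h | h
            · exact Or.inl (by exact_mod_cast h)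
            · exact Or.inr (by simp [h])
          rw [hc, runCount_seat (m : Int) rest.isEmpty (by omega) hor]
          ring
        · rw [if_neg (by rintro ⟨_, _, _, h⟩; exact hseat ((rightOk_rep m rest hb).1 h))]
          rw [ih m (by omega) true 0 0 rest hb (by simp)]
          have hm2 : ¬ 2 ≤ m := fun hh => hseat (Or.inl hh)
          have hrest : rest ≠ [] := fun hh => hseat (Or.inr hh)
          have hie : rest.isEmpty = false := by
            cases rest
            · simp at hrest
            · simp
          rw [hie]
          have hc : ((m + 1 : Nat) : Int) = (m : Int) + 1 := by push_cast; ring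
          rw [hc, runCount_small_true (m : Int) (by omega)]

-- Source B's loop walks a zero-run by incrementing run
lemma bZ : ∀ (m : Nat) (rest : List Int) (i count run : Int),
    bLoop (List.replicate m 0 ++ rest) i count run
      = bLoop rest (i + m) count (run + m) := by
  intro m
  induction m with
  | zero => intro rest i count run; simp
  | succ m ih =>
    intro rest i count run
    have hrw : List.replicate (m + 1) (0:Int) ++ rest
        = 0 :: (List.replicate m 0 ++ rest) := by simp [List.replicate_succ]
    rw [hrw, bLoop, if_pos rfl, ih]
    have h1 : i + 1 + m = i + ((m : Nat) + 1 : Nat) := by push_cast; ring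
    have h2 : run + 1 + m = run + ((m : Nat) + 1 : Nat) := by push_cast; ring
    rw [h1, h2]

-- B's loop equals the automaton
lemma bMain : ∀ (n : Nat) (l : List Int), l.length = n → ∀ (i count p2 p1 : Int),
    0 ≤ i → (if i = 0 then p2 = 0 ∧ p1 = 0 else p1 ≠ 0) →
    bLoop l i count 0 = count + autoA p2 p1 l := by
  intro n
  induction n using Nat.strong_induction_on with
  | _ n ih =>
    intro l hn i count p2 p1 hi hentry
    match l with
    | [] => simp [bLoop, autoA]
    | v :: t =>
      by_cases hv : v = 0
      · subst hv
        obtain ⟨L, rest, hdec, hbdry, hL1⟩ :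
            ∃ (L : Nat) (rest : List Int), ((0:Int) :: t) = List.replicate L 0 ++ rest ∧
              rest.headD 1 ≠ 0 ∧ 1 ≤ L := by
          refine ⟨((0 :: t).takeWhile (fun x => (x : Int) == 0)).length,
            (0 :: t).dropWhile (fun x => (x : Int) == 0), ?_, ?_, ?_⟩
          · conv_lhs => rw [← List.takeWhile_append_dropWhile
              (p := fun x => (x : Int) == 0) (l := 0 :: t)]
            congr 1
            exact List.eq_replicate_of_mem (fun b hbm => by
              have := List.mem_takeWhile_imp hbm; simpa using this)
          · have hdw := List.head?_dropWhile_not (fun x => (x : Int) == 0) (0 :: t)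
            cases hr : (0 :: t).dropWhile (fun x => (x : Int) == 0) with
            | nil => simp
            | cons w t' => rw [hr] at hdw; simpa using hdw
          · rw [List.takeWhile_cons_of_pos (by simp)]
            simp
        have hlen : L + rest.length = t.length + 1 := by
          have := congrArg List.length hdec
          simp at this
          omega
        rw [hdec, bZ L rest i count 0]
        have hz := zrun L (decide (i = 0)) p2 p1 rest hbdry (by
          by_cases h0 : i = 0
          · simpa [h0] using hentry
          · simpa [h0] using hentry)
        have hbe : ((0 : Int) + (L : Nat) == i + (L : Nat)) = decide (i = 0) := by
          by_cases h0 : i = 0 <;> simp [h0]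
        cases hr : rest with
        | nil =>
          rw [hr] at hz
          subst hr
          rw [bLoop, if_pos (by omega), hbe]
          simp only [tailv, List.isEmpty_nil] at hz
          simp only [zero_add] at hz ⊢
          omega
        | cons w t' =>
          rw [hr] at hz hbdry hlen
          subst hr
          replace hbdry : w ≠ 0 := by simpa using hbdry
          rw [bLoop, if_neg hbdry, if_pos (by omega), hbe]
          have hlt : t'.length < n := by
            rw [← hn]
            simp only [List.length_cons] at hlen ⊢
            omega
          rw [ih t'.length hlt t' rfl (i + (L : Nat) + 1) _ 0 w
            (by omega) (by
              have hne : i + (L : Nat) + 1 ≠ 0 := by omega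
              simp [hne, hbdry])]
          simp only [tailv, List.isEmpty_cons] at hz
          simp only [zero_add] at hz ⊢
          omega
      · rw [bLoop, if_neg hv]
        have hlt : t.length < n := by rw [← hn]; simp
        have h00 : (if (0:Int) > 0 then count + runCount 0 ((0:Int) == i) false else count)
            = count := by norm_num
        rw [h00]
        rw [ih t.length hlt t rfl (i + 1) count p1 v (by omega) (by
          have hne : i + 1 ≠ 0 := by omega
          simp [hne, hv])]
        have hA : autoA p2 p1 (v :: t) = autoA p1 v t := by
          rw [autoA, if_neg (by rintro ⟨h, _⟩; exact hv h)]
        rw [hA]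

-- ===== VERDICT (by name: the statement is the Claim_ definition above) =====
theorem max_new_people_spec : Claim_equal_max_new_people := by
  unfold Claim_equal_max_new_people
  intro s _
  unfold Spec_max_new_people max_new_people max_new_people_alt
  have ha := aMain s [] 0
  simp only [List.length_nil, List.nil_append, zero_add] at ha
  rw [ha]
  have hb := bMain s.length s rfl 0 0 0 0 le_rfl (by simp)
  rw [hb, zero_add]
  simp [back]
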